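/- GENERATED by c/gen_decode.py: decode facts of the image, one per distinct instruction byte string. -/
import UserX.DecodeImage

#decode_all Vorbis.Dec
  "0f570dc66f0100"  -- xorps xmm1,XMMWORD PTR [rip+0x16fc6]
  "0f84a7000000"  -- je 113bbc
  "0f8588000000"  -- jne 10c98f
  "0f8db9000000"  -- jge 10d2ac
  "0fb61b"  -- movzx ebx,BYTE PTR [rbx]
  "25aaaaaaaa"  -- and eax,0xaaaaaaaa
  "3c67"  -- cmp al,0x67
  "410fb71424"  -- movzx edx,WORD PTR [r12]
  "4183be7405000000"  -- cmp DWORD PTR [r14+0x574],0x0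
  "4189c6"  -- mov r14d,eax
  "418d4f04"  -- lea ecx,[r15+0x4]
  "41f7742408"  -- div DWORD PTR [r12+0x8]
  "440fbff8"  -- movsx r15d,ax
  "44886500"  -- mov BYTE PTR [rbp+0x0],r12b
  "4489ad40010000"  -- mov DWORD PTR [rbp+0x140],r13d
  "448b65fc"  -- mov r12d,DWORD PTR [rbp-0x4]
  "448d6801"  -- lea r13d,[rax+0x1]
  "45892f"  -- mov DWORD PTR [r15],r13d
  "458bbfe8060000"  -- mov r15d,DWORD PTR [r15+0x6e8]
  "4829c2"  -- sub rdx,rax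
  "4863f3"  -- movsxd rsi,ebx
  "4883e920"  -- sub rcx,0x20
  "48896c2468"  -- mov QWORD PTR [rsp+0x68],rbp
  "488b442410"  -- mov rax,QWORD PTR [rsp+0x10]
  "488b9528ffffff"  -- mov rdx,QWORD PTR [rbp-0xd8]
  "488d542440"  -- lea rdx,[rsp+0x40]
  "488d7cdd00"  -- lea rdi,[rbp+rbx*8+0x0]
  "488dbb40010000"  -- lea rdi,[rbx+0x140]
  "488dbd80000000"  -- lea rdi,[rbp+0x80]
  "48c7442408800d1200"  -- mov QWORD PTR [rsp+0x8],0x120d80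
  "490397c8010000"  -- add rdx,QWORD PTR [r15+0x1c8]
  "49891f"  -- mov QWORD PTR [r15],rbx
  "498d6c1d00"  -- lea rbp,[r13+rbx*1+0x0]
  "498dbc24e4060000"  -- lea rdi,[r12+0x6e4]
  "4a8b5ce508"  -- mov rbx,QWORD PTR [rbp+r12*8+0x8]
  "4c036308"  -- add r12,QWORD PTR [rbx+0x8]
  "4c896c2458"  -- mov QWORD PTR [rsp+0x58],r13
  "4c8b6c2430"  -- mov r13,QWORD PTR [rsp+0x30]
  "4c8d63e0"  -- lea r12,[rbx-0x20]
  "4d85f6"  -- test r14,r14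
  "4e8d34a500000000"  -- lea r14,[r12*4+0x0]
  "660fefc0"  -- pxor xmm0,xmm0
  "66448923"  -- mov WORD PTR [rbx],r12w
  "7338"  -- jae 100dc0
  "7474"  -- je 10c8ee
  "75d0"  -- jne 10ea9f
  "7d09"  -- jge 1022a4
  "7f1e"  -- jg 1041a0
  "81fdff000000"  -- cmp ebp,0xff
  "83ed01"  -- sub ebp,0x1
  "894d84"  -- mov DWORD PTR [rbp-0x7c],ecx
  "89c1"  -- mov ecx,eax
  "8b4504"  -- mov eax,DWORD PTR [rbp+0x4]
  "8b83e8040000"  -- mov eax,DWORD PTR [rbx+0x4e8]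
  "8d7001"  -- lea esi,[rax+0x1]
  "be26000000"  -- mov esi,0x26
  "c744241000000000"  -- mov DWORD PTR [rsp+0x10],0x0
  "c784248000000000000000"  -- mov DWORD PTR [rsp+0x80],0x0
  "e806b7feff"  -- call 100640
  "e8102cffff"  -- call 100300
  "e8199efeff"  -- call 100300
  "e82390ffff"  -- call 100640
  "e82cb0feff"  -- call 100560
  "e836c9ffff"  -- call 10d5c0
  "e841a9feff"  -- call 100560
  "e84bf3feff"  -- call 103d00
  "e856acfeff"  -- call 100720
  "e86434ffff"  -- call 100640
  "e86fc0feff"  -- call 100640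
  "e87a76ffff"  -- call 100640
  "e885faffff"  -- call 1066c0
  "e89044ffff"  -- call 108dc0
  "e89a3dffff"  -- call 100720
  "e8a56effff"  -- call 102920
  "e8af90ffff"  -- call 100800
  "e8b895ffff"  -- call 100640
  "e8c317ffff"  -- call 100480
  "e8cc65ffff"  -- call 100640
  "e8d6f5ffff"  -- call 102440
  "e8e10fffff"  -- call 100640
  "e8ea6fffff"  -- call 10d1c0
  "e8f1d3feff"  -- call 100720
  "e8fdabfeff"  -- call 100300
  "e936fcffff"  -- jmp 113b22
  "e97ff1ffff"  -- jmp 113b22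
  "e9d4eaffff"  -- jmp 113b22
  "eb3e"  -- jmp 1078d5
  "ebc6"  -- jmp 11127b
  "f20f11442430"  -- movsd QWORD PTR [rsp+0x30],xmm0
  "f20f59da"  -- mulsd xmm3,xmm2
  "f30f10442404"  -- movss xmm0,DWORD PTR [rsp+0x4]
  "f30f106b0c"  -- movss xmm5,DWORD PTR [rbx+0xc]
  "f30f1145bc"  -- movss DWORD PTR [rbp-0x44],xmm0
  "f30f116804"  -- movss DWORD PTR [rax+0x4],xmm5
  "f30f584be4"  -- addss xmm1,DWORD PTR [rbx-0x1c]
  "f30f597b04"  -- mulss xmm7,DWORD PTR [rbx+0x4]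
  "f30f5ce8"  -- subss xmm5,xmm0
  "f3410f114e08"  -- movss DWORD PTR [r14+0x8],xmm1
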